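-- pv_equiv track=rewrite | github.com/jgontrum/multilevel-coarse-to-fine-parsing | ctf_parser/grammar/transform.py | replace_symbols
-- ===== SOURCE A (Python) =====
-- def replace_symbols(text, fine_to_coarse, unary_symbol="‡", binary_symbol="†"):
--     """
--     Splits a symbol and replaces all occurences with their coarse counterpart.
--     This is needed because through binarization, many symbols consist of a
--     sequence of other symbols.
--     :param text: The symbol string
--     :param fine_to_coarse: Maps fine symbols to a coarse symbol
--     :param unary_symbol: Character used to separate symbols froma unary chain rule
--     :param binary_symbol: Character used to separate symbols from rules with an arity > 2
--     :return:
--     """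
--     unary_split = text.split(unary_symbol)
--     unaries_replaced = []
--     for unary in unary_split:
--         binarize_split = unary.split(binary_symbol)
--         binaries_replaced = []
--         for binary in binarize_split:
--             binaries_replaced.append(fine_to_coarse.get(binary, binary))
--         unaries_replaced.append(binary_symbol.join(binaries_replaced))
--     ret = unary_symbol.join(unaries_replaced)
--     return ret
-- ===== SOURCE B (Python) =====
-- def replace_symbols(text, fine_to_coarse, unary_symbol="\u2021", binary_symbol="\u2020"):
--     """Single-pass tokenizer: instead of a nested split-on-unary / split-on-binary
--     pipeline with two join passes, walk the string once by index, cutting a token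
--     whenever either delimiter starts at the current position (unary checked first),
--     mapping each token through the dict as it is cut, and concatenating one flat
--     part list at the end."""
--     parts = []
--     tok_start = 0
--     i = 0
--     n = len(text)
--     while i < n:
--         if text.startswith(unary_symbol, i):
--             tok = text[tok_start:i]
--             parts.append(fine_to_coarse.get(tok, tok))
--             parts.append(unary_symbol)
--             i += len(unary_symbol)
--             tok_start = i
--         elif text.startswith(binary_symbol, i):
--             tok = text[tok_start:i]
--             parts.append(fine_to_coarse.get(tok, tok))
--             parts.append(binary_symbol)
--             i += len(binary_symbol)
--             tok_start = i
--         else: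
--             i += 1
--     tok = text[tok_start:]
--     parts.append(fine_to_coarse.get(tok, tok))
--     return "".join(parts)
-- ===== Notes on version B (the rewrite author's own statement) =====
-- stated objective: alternative
-- what changed: Replaced the nested split-on-unary / split-on-binary / dict-map / double-join pipeline by a single-pass tokenizer that walks the string once, cutting and mapping a token whenever either delimiter starts at the current position and concatenating one flat part list.
-- outside the precondition, e.g. on replace_symbols('aba', {'a': 'X'}, 'ba', 'ab'): A returns 'Xba', B returns 'abX'
import Mathlib
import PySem

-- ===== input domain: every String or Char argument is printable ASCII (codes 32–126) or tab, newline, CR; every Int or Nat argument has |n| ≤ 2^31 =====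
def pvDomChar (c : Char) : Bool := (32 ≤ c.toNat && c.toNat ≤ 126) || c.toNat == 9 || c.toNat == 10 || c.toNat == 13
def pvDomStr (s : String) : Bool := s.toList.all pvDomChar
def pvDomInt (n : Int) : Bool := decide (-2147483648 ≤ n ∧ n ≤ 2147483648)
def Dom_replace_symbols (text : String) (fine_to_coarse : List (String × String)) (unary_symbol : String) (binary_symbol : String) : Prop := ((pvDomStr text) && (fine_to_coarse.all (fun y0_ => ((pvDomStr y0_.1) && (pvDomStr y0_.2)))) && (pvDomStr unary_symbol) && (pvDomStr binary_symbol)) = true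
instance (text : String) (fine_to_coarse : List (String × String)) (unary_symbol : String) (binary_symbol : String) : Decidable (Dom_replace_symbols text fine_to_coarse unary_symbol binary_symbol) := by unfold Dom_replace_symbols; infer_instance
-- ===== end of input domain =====

-- B replaces A's nested split-on-unary / split-on-binary / double-join pipeline by a
-- single-pass tokenizer over the string ("alternative" objective, same cost).

-- shared primitive: Python's fine_to_coarse.get(tok, tok) on a token given as a char list
def pvGetTok (m : List (String × String)) (t : List Char) : List Char :=
  ((PySem.Dict.mk m).getD (String.ofList t) (String.ofList t)).toList

-- ===== PORT A =====
-- literal transliteration of A: split on unary_symbol, split each piece on binary_symbol,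
-- replace each token through the dict, join back with binary_symbol then unary_symbol.
-- The 'none' branches of split? (empty separator: Python ValueError) are excluded by Pre_.
def replace_symbols (text : String) (fine_to_coarse : List (String × String)) (unary_symbol : String) (binary_symbol : String) : String :=
  match PySem.Chars.split? text.toList unary_symbol.toList with
  | none => ""
  | some unary_split =>
    let unaries_replaced := unary_split.foldl (fun acc unary =>
      match PySem.Chars.split? unary binary_symbol.toList with
      | none => acc
      | some binarize_split =>
        let binaries_replaced := binarize_split.foldl
          (fun acc2 bin => acc2 ++ [pvGetTok fine_to_coarse bin]) []
        acc ++ [PySem.Chars.join binary_symbol.toList binaries_replaced]) []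
    String.ofList (PySem.Chars.join unary_symbol.toList unaries_replaced)

-- ===== PORT B =====
-- B's single while-loop: state (i = current position, tok_start = start of the pending
-- token) over the fixed text; each step either cuts a token at a delimiter (unary
-- checked first) or advances i by one.  text.startswith(sym, i) is ported as
-- "sym prefix of (text drop i)"; text[tok_start:i] as (drop tok_start).take (i - tok_start).
-- Fuel only makes the recursion total in Lean: whenever both delimiters are nonempty
-- (Pre_), the fuel passed below is never exhausted.
def pvScanIdx (m : List (String × String)) (u b t : List Char) : Nat → Nat → Nat → List (List Char)
  | 0, _, _ => []
  | fuel+1, i, tok_start =>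
    if i < t.length then
      if PySem.Chars.startswith (t.drop i) u then
        pvGetTok m ((t.drop tok_start).take (i - tok_start)) :: u ::
          pvScanIdx m u b t fuel (i + u.length) (i + u.length)
      else if PySem.Chars.startswith (t.drop i) b then
        pvGetTok m ((t.drop tok_start).take (i - tok_start)) :: b ::
          pvScanIdx m u b t fuel (i + b.length) (i + b.length)
      else
        pvScanIdx m u b t fuel (i + 1) tok_start
    else [pvGetTok m (t.drop tok_start)]

def replace_symbols_alt (text : String) (fine_to_coarse : List (String × String)) (unary_symbol : String) (binary_symbol : String) : String :=
  String.ofList (PySem.Chars.join []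
    (pvScanIdx fine_to_coarse unary_symbol.toList binary_symbol.toList text.toList
      (text.toList.length + 1) 0 0))

-- ===== PRECONDITION & SPEC =====
-- Pre_ excludes (a) empty delimiters, on which Python A raises ValueError('empty separator'),
-- and (b) texts containing a binary_symbol occurrence that starts strictly before and
-- overlaps into a unary_symbol occurrence (without itself starting a unary occurrence):
-- on such overlapping-delimiter texts A's unary-first nested split and B's single-pass
-- leftmost tokenization are both defensible readings of an unspecified corner and may differ.
def Pre_replace_symbols (text : String) (fine_to_coarse : List (String × String)) (unary_symbol : String) (binary_symbol : String) : Prop :=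
  unary_symbol ≠ "" ∧ binary_symbol ≠ "" ∧
  ¬ ∃ p < text.toList.length, ∃ q < text.toList.length,
      p < q ∧ q < p + binary_symbol.toList.length ∧
      binary_symbol.toList <+: text.toList.drop p ∧
      unary_symbol.toList <+: text.toList.drop q ∧
      ¬ unary_symbol.toList <+: text.toList.drop p
instance (text : String) (fine_to_coarse : List (String × String)) (unary_symbol : String) (binary_symbol : String) : Decidable (Pre_replace_symbols text fine_to_coarse unary_symbol binary_symbol) := by unfold Pre_replace_symbols; infer_instance

def pvWitness_replace_symbols : String × (List (String × String)) × String × String :=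
  ("NP+VP|S", [("NP", "X"), ("VP", "Y")], "|", "+")

def Spec_replace_symbols (text : String) (fine_to_coarse : List (String × String)) (unary_symbol : String) (binary_symbol : String) (out : String) : Prop := out = replace_symbols_alt text fine_to_coarse unary_symbol binary_symbol
instance (text : String) (fine_to_coarse : List (String × String)) (unary_symbol : String) (binary_symbol : String) (out : String) : Decidable (Spec_replace_symbols text fine_to_coarse unary_symbol binary_symbol out) := by unfold Spec_replace_symbols; infer_instance

-- ===== CLAIM (what is proved, stated in full; the proofs are below) =====
def Claim_equal_replace_symbols : Prop := ∀ (text : String) (fine_to_coarse : List (String × String)) (unary_symbol : String) (binary_symbol : String), Dom_replace_symbols text fine_to_coarse unary_symbol binary_symbol → Pre_replace_symbols text fine_to_coarse unary_symbol binary_symbol → Spec_replace_symbols text fine_to_coarse unary_symbol binary_symbol (replace_symbols text fine_to_coarse unary_symbol binary_symbol)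

-- ===== LEMMAS AND PROOFS =====

-- proof-side form of the no-overlap part of Pre_ (unbounded, over char lists)
def pvNoOv (u b s : List Char) : Prop :=
  ¬ ∃ p q : Nat, p < q ∧ q < p + b.length ∧ b <+: s.drop p ∧ u <+: s.drop q ∧ ¬ u <+: s.drop p

-- proof-side form of B's scanner, over the state (pending token, remaining suffix);
-- pv_scanIdx_eq below identifies it with the index-based port pvScanIdx
def pvScan (m : List (String × String)) (u b : List Char) : Nat → List Char → List Char → List (List Char)
  | 0, _, _ => []
  | fuel+1, tok, rest =>
    match rest with
    | [] => [pvGetTok m tok]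
    | c :: rs =>
      if PySem.Chars.startswith (c :: rs) u then
        pvGetTok m tok :: u :: pvScan m u b fuel [] ((c :: rs).drop u.length)
      else if PySem.Chars.startswith (c :: rs) b then
        pvGetTok m tok :: b :: pvScan m u b fuel [] ((c :: rs).drop b.length)
      else
        pvScan m u b fuel (tok ++ [c]) rs

-- find l sep = 0 when sep is a prefix of l
lemma pv_find_of_prefix (l sep : List Char) (h : sep <+: l) : PySem.Chars.find l sep = 0 := by
  have h0 : 0 ≤ PySem.Chars.find l sep := (PySem.Chars.find_nonneg_iff _ _).mpr h.isInfix
  obtain ⟨h1, h2⟩ := PySem.Chars.find_spec h0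
  by_contra hne
  exact h2 0 (by omega) (by simpa using h)

-- uniqueness characterisation of find: the first matching position determines it
lemma pv_find_eq (l sep : List Char) (k : Int) (hk : 0 ≤ k)
    (h1 : sep <+: l.drop k.toNat) (h2 : ∀ i < k.toNat, ¬ sep <+: l.drop i) :
    PySem.Chars.find l sep = k := by
  have hinf : sep <:+: l := by
    rw [← PySem.Chars.isIn_iff_infix, ← PySem.Chars.exists_prefix_drop_iff_isIn]
    exact ⟨k.toNat, h1⟩
  have h0 : 0 ≤ PySem.Chars.find l sep := (PySem.Chars.find_nonneg_iff _ _).mpr hinf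
  obtain ⟨hp, hmin⟩ := PySem.Chars.find_spec h0
  rcases lt_trichotomy (PySem.Chars.find l sep).toNat k.toNat with h | h | h
  · exact absurd hp (h2 _ h)
  · omega
  · exact absurd h1 (hmin _ h)

-- recursion of find over cons when sep does not match at position 0
lemma pv_find_cons (c : Char) (rest sep : List Char) (hnp : ¬ sep <+: (c :: rest)) :
    PySem.Chars.find (c :: rest) sep =
      if PySem.Chars.find rest sep = -1 then -1 else PySem.Chars.find rest sep + 1 := by
  split_ifs with h
  · rw [PySem.Chars.find_eq_neg_one_iff] at h ⊢
    rw [List.infix_cons_iff]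
    rintro (h' | h')
    · exact hnp h'
    · exact h h'
  · have h0 : 0 ≤ PySem.Chars.find rest sep := by
      have := PySem.Chars.neg_one_le_find (s := rest) (sub := sep)
      omega
    obtain ⟨hp, hmin⟩ := PySem.Chars.find_spec h0
    apply pv_find_eq _ _ _ (by omega)
    · have : (PySem.Chars.find rest sep + 1).toNat = (PySem.Chars.find rest sep).toNat + 1 := by omega
      rw [this]
      simpa using hp
    · intro i hi
      have hlt : (PySem.Chars.find rest sep + 1).toNat = (PySem.Chars.find rest sep).toNat + 1 := by omega
      rw [hlt] at hi
      cases i with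
      | zero => simpa using hnp
      | succ j =>
        have := hmin j (by omega)
        simpa using this

lemma pv_find_nil (sep : List Char) (hsep : sep ≠ []) : PySem.Chars.find [] sep = -1 := by
  rw [PySem.Chars.find_eq_neg_one_iff]
  intro h
  exact hsep (List.eq_nil_of_infix_nil h)

-- splitOn.go fully characterised through find
lemma pv_go_eq (sep : List Char) (hsep : sep ≠ []) :
    ∀ n l, l.length ≤ n → ∀ fuel, l.length ≤ fuel → ∀ (cur : List Char) (acc : List (List Char)),
    PySem.Chars.splitOn.go sep fuel l cur acc =
      if PySem.Chars.find l sep < 0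
      then acc.reverse ++ [cur.reverse ++ l]
      else acc.reverse ++ (cur.reverse ++ l.take (PySem.Chars.find l sep).toNat) ::
        PySem.Chars.splitOn (l.drop ((PySem.Chars.find l sep).toNat + sep.length)) sep := by
  intro n
  induction n with
  | zero =>
    intro l hl fuel hf cur acc
    have : l = [] := List.eq_nil_of_length_eq_zero (by omega)
    subst this
    rw [pv_find_nil sep hsep]
    cases fuel <;> simp [PySem.Chars.splitOn.go]
  | succ n IH =>
    intro l hl fuel hf cur acc
    cases l with
    | nil =>
      rw [pv_find_nil sep hsep]
      cases fuel <;> simp [PySem.Chars.splitOn.go]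
    | cons c rest =>
      cases fuel with
      | zero => simp at hf
      | succ f =>
        show (if sep.isPrefixOf (c :: rest) then
          PySem.Chars.splitOn.go sep f (List.drop sep.length (c :: rest)) [] (cur.reverse :: acc)
          else PySem.Chars.splitOn.go sep f rest (c :: cur) acc) = _
        simp only [List.length_cons] at hl hf
        by_cases hpre : sep <+: (c :: rest)
        · rw [if_pos ((List.isPrefixOf_iff_prefix).mpr hpre)]
          have hfind0 : PySem.Chars.find (c :: rest) sep = 0 := pv_find_of_prefix _ _ hpre
          have hseplen : 1 ≤ sep.length := by
            have : sep.length ≠ 0 := by simpa using hsep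
            omega
          have hdlen : (List.drop sep.length (c :: rest)).length ≤ (c :: rest).length - 1 := by
            simp; omega
          rw [IH _ (by simp at hdlen ⊢; omega) f (by simp at hdlen ⊢; omega) [] (cur.reverse :: acc)]
          rw [hfind0]
          norm_num
          have hsplit : PySem.Chars.splitOn (List.drop sep.length (c :: rest)) sep =
              PySem.Chars.splitOn.go sep ((List.drop sep.length (c :: rest)).length + 1)
                (List.drop sep.length (c :: rest)) [] [] := rfl
          rw [hsplit, IH _ (by simp at hdlen ⊢; omega) _ (by omega) [] []]
          split_ifs <;> simp
        · rw [if_neg (by rw [List.isPrefixOf_iff_prefix]; exact hpre)]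
          rw [IH _ (by omega) f (by omega) (c :: cur) acc]
          rw [pv_find_cons c rest sep hpre]
          by_cases hneg : PySem.Chars.find rest sep = -1
          · rw [hneg]
            norm_num
          · have h0 : 0 ≤ PySem.Chars.find rest sep := by
              have := PySem.Chars.neg_one_le_find (s := rest) (sub := sep)
              omega
            rw [if_neg hneg]
            have harith : ¬ (PySem.Chars.find rest sep + 1 < 0) := by omega
            rw [if_neg (by omega : ¬ PySem.Chars.find rest sep < 0), if_neg harith]
            have htn : (PySem.Chars.find rest sep + 1).toNat = (PySem.Chars.find rest sep).toNat + 1 := by omega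
            rw [htn]
            have hdr : (PySem.Chars.find rest sep).toNat + 1 + sep.length
                = ((PySem.Chars.find rest sep).toNat + sep.length) + 1 := by omega
            rw [hdr, List.drop_succ_cons]
            simp

-- one step of splitOn, in find terms
lemma pv_splitOn_step (l sep : List Char) (hsep : sep ≠ []) :
    PySem.Chars.splitOn l sep =
      if PySem.Chars.find l sep < 0 then [l]
      else l.take (PySem.Chars.find l sep).toNat ::
        PySem.Chars.splitOn (l.drop ((PySem.Chars.find l sep).toNat + sep.length)) sep := by
  have : PySem.Chars.splitOn l sep = PySem.Chars.splitOn.go sep (l.length + 1) l [] [] := rfl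
  rw [this, pv_go_eq sep hsep l.length l le_rfl (l.length + 1) (by omega) [] []]
  split_ifs <;> simp

lemma pv_splitOn_ne_nil (l sep : List Char) (hsep : sep ≠ []) :
    PySem.Chars.splitOn l sep ≠ [] := by
  rw [pv_splitOn_step l sep hsep]
  split_ifs <;> simp

lemma pv_flatten_intersperse_nil (xs : List (List Char)) :
    (xs.intersperse ([] : List Char)).flatten = xs.flatten := by
  induction xs with
  | nil => rfl
  | cons x xs IH =>
    cases xs with
    | nil => rfl
    | cons y ys => simp_all [List.intersperse]

lemma pv_join_nil_eq_flatten (xs : List (List Char)) :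
    PySem.Chars.join [] xs = xs.flatten := by
  show List.intercalate [] xs = xs.flatten
  rw [List.intercalate, pv_flatten_intersperse_nil]

lemma pv_toList_ne_nil (s : String) (h : s ≠ "") : s.toList ≠ [] := by
  intro hn
  apply h
  have := congrArg String.ofList hn
  simpa using this

-- an infix of a dropped list is an infix of the list
lemma pv_infix_drop (x l : List Char) (k : Nat) (h : x <:+: l.drop k) : x <:+: l :=
  h.trans (List.drop_suffix k l).isInfix

-- find is -1 on every drop when it is -1
lemma pv_find_drop_neg (l x : List Char) (k : Nat) (h : PySem.Chars.find l x < 0) :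
    PySem.Chars.find (l.drop k) x = -1 := by
  have h1 : PySem.Chars.find l x = -1 := by
    have := PySem.Chars.neg_one_le_find (s := l) (sub := x)
    omega
  rw [PySem.Chars.find_eq_neg_one_iff] at h1 ⊢
  intro hc
  exact h1 (pv_infix_drop _ _ _ hc)

-- shifting find past a match-free prefix
lemma pv_find_drop (l x : List Char) (k : Nat) (h0 : 0 ≤ PySem.Chars.find l x)
    (hk : k ≤ (PySem.Chars.find l x).toNat) :
    PySem.Chars.find (l.drop k) x = PySem.Chars.find l x - k := by
  obtain ⟨hp, hmin⟩ := PySem.Chars.find_spec h0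
  apply pv_find_eq _ _ _ (by omega)
  · have : ((PySem.Chars.find l x - k).toNat) = (PySem.Chars.find l x).toNat - k := by omega
    rw [this, List.drop_drop]
    have : k + ((PySem.Chars.find l x).toNat - k) = (PySem.Chars.find l x).toNat := by omega
    rw [this]
    exact hp
  · intro i hi
    rw [List.drop_drop]
    apply hmin
    omega

-- no occurrence of x inside (take t l) when the first occurrence of x in l is ≥ t
lemma pv_find_take_neg (l x : List Char) (t : Nat) (hx : x ≠ [])
    (h : PySem.Chars.find l x < 0 ∨ (0 ≤ PySem.Chars.find l x ∧ t ≤ (PySem.Chars.find l x).toNat)) :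
    PySem.Chars.find (l.take t) x = -1 := by
  rw [PySem.Chars.find_eq_neg_one_iff]
  intro hc
  rw [← PySem.Chars.isIn_iff_infix, ← PySem.Chars.exists_prefix_drop_iff_isIn] at hc
  obtain ⟨j, hj⟩ := hc
  rw [List.drop_take, List.prefix_take_iff] at hj
  obtain ⟨hj1, hj2⟩ := hj
  have hxlen : 1 ≤ x.length := by
    have : x.length ≠ 0 := by simpa using hx
    omega
  rcases h with h | ⟨h0, ht⟩
  · have h1 : PySem.Chars.find l x = -1 := by
      have := PySem.Chars.neg_one_le_find (s := l) (sub := x)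
      omega
    rw [PySem.Chars.find_eq_neg_one_iff] at h1
    exact h1 (pv_infix_drop x l j hj1.isInfix)
  · obtain ⟨_, hmin⟩ := PySem.Chars.find_spec h0
    exact hmin j (by omega) hj1

-- find inside a take, when the occurrence fits
lemma pv_find_take (l x : List Char) (t : Nat) (h0 : 0 ≤ PySem.Chars.find l x)
    (hfit : (PySem.Chars.find l x).toNat + x.length ≤ t) :
    PySem.Chars.find (l.take t) x = PySem.Chars.find l x := by
  obtain ⟨hp, hmin⟩ := PySem.Chars.find_spec h0
  apply pv_find_eq _ _ _ h0
  · rw [List.drop_take, List.prefix_take_iff]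
    exact ⟨hp, by omega⟩
  · intro i hi
    rw [List.drop_take, List.prefix_take_iff]
    rintro ⟨hc, -⟩
    exact hmin i hi hc

lemma pv_join_cons (sep x : List Char) (y : List Char) (ys : List (List Char)) :
    PySem.Chars.join sep (x :: y :: ys) = x ++ sep ++ PySem.Chars.join sep (y :: ys) :=
  PySem.Chars.join_cons_cons sep x y ys

-- pvScan ignores its fuel as long as there is enough of it
lemma pv_scan_fuel (m : List (String × String)) (u b : List Char) (hu : u ≠ []) (hb : b ≠ []) :
    ∀ n s, s.length ≤ n → ∀ tok fuel fuel', s.length < fuel → s.length < fuel' →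
    pvScan m u b fuel tok s = pvScan m u b fuel' tok s := by
  have hul : 1 ≤ u.length := by
    have h' : u.length ≠ 0 := by simpa using hu
    omega
  have hbl : 1 ≤ b.length := by
    have h' : b.length ≠ 0 := by simpa using hb
    omega
  intro n
  induction n with
  | zero =>
    intro s hs tok fuel fuel' hf hf'
    have : s = [] := List.eq_nil_of_length_eq_zero (by omega)
    subst this
    cases fuel with
    | zero => omega
    | succ f => cases fuel' with
      | zero => omega
      | succ f' => rfl
  | succ n IH =>
    intro s hs tok fuel fuel' hf hf'
    cases s with
    | nil =>
      cases fuel with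
      | zero => omega
      | succ f => cases fuel' with
        | zero => omega
        | succ f' => rfl
    | cons c rs =>
      cases fuel with
      | zero => omega
      | succ f => cases fuel' with
        | zero => omega
        | succ f' =>
          simp only [List.length_cons] at hs hf hf'
          simp only [pvScan]
          by_cases h1 : PySem.Chars.startswith (c :: rs) u
          · rw [if_pos h1, if_pos h1]
            have hd : ((c :: rs).drop u.length).length ≤ n := by simp; omega
            rw [IH _ hd [] f f' (by simp; omega) (by simp; omega)]
          · rw [if_neg h1, if_neg h1]
            by_cases h2 : PySem.Chars.startswith (c :: rs) b
            · rw [if_pos h2, if_pos h2]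
              have hd : ((c :: rs).drop b.length).length ≤ n := by simp; omega
              rw [IH _ hd [] f f' (by simp; omega) (by simp; omega)]
            · rw [if_neg h2, if_neg h2]
              exact IH rs (by omega) (tok ++ [c]) f f' (by omega) (by omega)

-- scan with no delimiter occurrence: one token
lemma pv_scan_none (m : List (String × String)) (u b : List Char) (hu : u ≠ []) (hb : b ≠ []) :
    ∀ s tok fuel, s.length < fuel →
    PySem.Chars.find s u < 0 → PySem.Chars.find s b < 0 →
    pvScan m u b fuel tok s = [pvGetTok m (tok ++ s)] := by
  intro s
  induction s with
  | nil =>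
    intro tok fuel hf _ _
    cases fuel with
    | zero => omega
    | succ f => simp [pvScan]
  | cons c rs IH =>
    intro tok fuel hf hfu hfb
    cases fuel with
    | zero => simp at hf
    | succ f =>
      have hnu : ¬ u <+: (c :: rs) := by
        intro hc
        rw [pv_find_of_prefix _ _ hc] at hfu
        omega
      have hnb : ¬ b <+: (c :: rs) := by
        intro hc
        rw [pv_find_of_prefix _ _ hc] at hfb
        omega
      rw [pv_find_cons c rs u hnu] at hfu
      rw [pv_find_cons c rs b hnb] at hfb
      have hfu' : PySem.Chars.find rs u < 0 := by
        split_ifs at hfu with h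
        · rw [h]; omega
        · have := PySem.Chars.neg_one_le_find (s := rs) (sub := u)
          omega
      have hfb' : PySem.Chars.find rs b < 0 := by
        split_ifs at hfb with h
        · rw [h]; omega
        · have := PySem.Chars.neg_one_le_find (s := rs) (sub := b)
          omega
      show (if PySem.Chars.startswith (c :: rs) u then _ else _) = _
      rw [if_neg (by simpa [PySem.Chars.startswith, List.isPrefixOf_iff_prefix] using hnu),
          if_neg (by simpa [PySem.Chars.startswith, List.isPrefixOf_iff_prefix] using hnb)]
      simp only [List.length_cons] at hf
      rw [IH (tok ++ [c]) f (by omega) hfu' hfb']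
      simp

-- scan when the first boundary is the unary delimiter
lemma pv_scan_u (m : List (String × String)) (u b : List Char) (hu : u ≠ []) (hb : b ≠ []) :
    ∀ s tok fuel, s.length < fuel →
    0 ≤ PySem.Chars.find s u →
    (PySem.Chars.find s b < 0 ∨ PySem.Chars.find s u ≤ PySem.Chars.find s b) →
    pvScan m u b fuel tok s =
      pvGetTok m (tok ++ s.take (PySem.Chars.find s u).toNat) :: u ::
        pvScan m u b ((s.drop ((PySem.Chars.find s u).toNat + u.length)).length + 1) []
          (s.drop ((PySem.Chars.find s u).toNat + u.length)) := by
  have hul : 1 ≤ u.length := by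
    have h' : u.length ≠ 0 := by simpa using hu
    omega
  have hbl : 1 ≤ b.length := by
    have h' : b.length ≠ 0 := by simpa using hb
    omega
  intro s
  induction s with
  | nil =>
    intro tok fuel hf h0 _
    rw [pv_find_nil u hu] at h0
    omega
  | cons c rs IH =>
    intro tok fuel hf h0 hord
    cases fuel with
    | zero => simp at hf
    | succ f =>
      simp only [List.length_cons] at hf
      show (if PySem.Chars.startswith (c :: rs) u then _ else _) = _
      by_cases hpu : u <+: (c :: rs)
      · rw [if_pos (by simpa [PySem.Chars.startswith, List.isPrefixOf_iff_prefix] using hpu)]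
        have hf0 : PySem.Chars.find (c :: rs) u = 0 := pv_find_of_prefix _ _ hpu
        rw [hf0]
        simp only [Int.toNat_zero, List.take_zero, List.append_nil, Nat.zero_add]
        rw [pv_scan_fuel m u b hu hb ((c :: rs).drop u.length).length ((c :: rs).drop u.length)
          le_rfl [] f (((c :: rs).drop u.length).length + 1) (by simp; omega) (by omega)]
      · rw [if_neg (by simpa [PySem.Chars.startswith, List.isPrefixOf_iff_prefix] using hpu)]
        have hcu := pv_find_cons c rs u hpu
        have hfu' : 0 ≤ PySem.Chars.find rs u ∧
            PySem.Chars.find (c :: rs) u = PySem.Chars.find rs u + 1 := by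
          by_cases h : PySem.Chars.find rs u = -1
          · rw [hcu, if_pos h] at h0; omega
          · have := PySem.Chars.neg_one_le_find (s := rs) (sub := u)
            rw [hcu, if_neg h]
            constructor <;> omega
        by_cases hpb : b <+: (c :: rs)
        · exfalso
          have hfb0 : PySem.Chars.find (c :: rs) b = 0 := pv_find_of_prefix _ _ hpb
          rcases hord with h | h
          · rw [hfb0] at h; omega
          · rw [hfb0] at h
            rw [hfu'.2] at h
            omega
        · rw [if_neg (by simpa [PySem.Chars.startswith, List.isPrefixOf_iff_prefix] using hpb)]
          have hcb := pv_find_cons c rs b hpb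
          have hord' : PySem.Chars.find rs b < 0 ∨ PySem.Chars.find rs u ≤ PySem.Chars.find rs b := by
            by_cases h : PySem.Chars.find rs b = -1
            · left; omega
            · right
              rcases hord with hx | hx
              · rw [hcb, if_neg h] at hx
                have := PySem.Chars.neg_one_le_find (s := rs) (sub := b)
                omega
              · rw [hcb, if_neg h, hfu'.2] at hx
                omega
          rw [IH (tok ++ [c]) f (by omega) hfu'.1 hord']
          rw [hfu'.2]
          have ht : (PySem.Chars.find rs u + 1).toNat = (PySem.Chars.find rs u).toNat + 1 := by omega
          rw [ht]
          have ht2 : (PySem.Chars.find rs u).toNat + 1 + u.length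
              = ((PySem.Chars.find rs u).toNat + u.length) + 1 := by omega
          rw [ht2, List.drop_succ_cons, List.take_succ_cons]
          simp [List.append_assoc]

-- scan when the first boundary is the binary delimiter
lemma pv_scan_b (m : List (String × String)) (u b : List Char) (hu : u ≠ []) (hb : b ≠ []) :
    ∀ s tok fuel, s.length < fuel →
    0 ≤ PySem.Chars.find s b →
    (PySem.Chars.find s u < 0 ∨ PySem.Chars.find s b < PySem.Chars.find s u) →
    pvScan m u b fuel tok s =
      pvGetTok m (tok ++ s.take (PySem.Chars.find s b).toNat) :: b ::
        pvScan m u b ((s.drop ((PySem.Chars.find s b).toNat + b.length)).length + 1) []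
          (s.drop ((PySem.Chars.find s b).toNat + b.length)) := by
  have hul : 1 ≤ u.length := by
    have h' : u.length ≠ 0 := by simpa using hu
    omega
  have hbl : 1 ≤ b.length := by
    have h' : b.length ≠ 0 := by simpa using hb
    omega
  intro s
  induction s with
  | nil =>
    intro tok fuel hf h0 _
    rw [pv_find_nil b hb] at h0
    omega
  | cons c rs IH =>
    intro tok fuel hf h0 hord
    cases fuel with
    | zero => simp at hf
    | succ f =>
      simp only [List.length_cons] at hf
      show (if PySem.Chars.startswith (c :: rs) u then _ else _) = _
      by_cases hpu : u <+: (c :: rs)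
      · exfalso
        have hfu0 : PySem.Chars.find (c :: rs) u = 0 := pv_find_of_prefix _ _ hpu
        rcases hord with h | h
        · omega
        · rw [hfu0] at h; omega
      · rw [if_neg (by simpa [PySem.Chars.startswith, List.isPrefixOf_iff_prefix] using hpu)]
        by_cases hpb : b <+: (c :: rs)
        · rw [if_pos (by simpa [PySem.Chars.startswith, List.isPrefixOf_iff_prefix] using hpb)]
          have hf0 : PySem.Chars.find (c :: rs) b = 0 := pv_find_of_prefix _ _ hpb
          rw [hf0]
          simp only [Int.toNat_zero, List.take_zero, List.append_nil, Nat.zero_add]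
          rw [pv_scan_fuel m u b hu hb ((c :: rs).drop b.length).length ((c :: rs).drop b.length)
            le_rfl [] f (((c :: rs).drop b.length).length + 1) (by simp; omega) (by omega)]
        · rw [if_neg (by simpa [PySem.Chars.startswith, List.isPrefixOf_iff_prefix] using hpb)]
          have hcu := pv_find_cons c rs u hpu
          have hcb := pv_find_cons c rs b hpb
          have hfb' : 0 ≤ PySem.Chars.find rs b ∧
              PySem.Chars.find (c :: rs) b = PySem.Chars.find rs b + 1 := by
            by_cases h : PySem.Chars.find rs b = -1
            · rw [hcb, if_pos h] at h0; omega
            · have := PySem.Chars.neg_one_le_find (s := rs) (sub := b)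
              rw [hcb, if_neg h]
              constructor <;> omega
          have hord' : PySem.Chars.find rs u < 0 ∨ PySem.Chars.find rs b < PySem.Chars.find rs u := by
            by_cases h : PySem.Chars.find rs u = -1
            · left; omega
            · right
              rcases hord with hx | hx
              · rw [hcu, if_neg h] at hx
                have := PySem.Chars.neg_one_le_find (s := rs) (sub := u)
                omega
              · rw [hcu, if_neg h, hfb'.2] at hx
                omega
          rw [IH (tok ++ [c]) f (by omega) hfb'.1 hord']
          rw [hfb'.2]
          have ht : (PySem.Chars.find rs b + 1).toNat = (PySem.Chars.find rs b).toNat + 1 := by omega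
          rw [ht]
          have ht2 : (PySem.Chars.find rs b).toNat + 1 + b.length
              = ((PySem.Chars.find rs b).toNat + b.length) + 1 := by omega
          rw [ht2, List.drop_succ_cons, List.take_succ_cons]
          simp [List.append_assoc]

-- the no-overlap property survives dropping a prefix
lemma pv_noov_drop (u b s : List Char) (k : Nat) (h : pvNoOv u b s) : pvNoOv u b (s.drop k) := by
  rintro ⟨p, q, h1, h2, h3, h4, h5⟩
  exact h ⟨k + p, k + q, by omega, by omega,
    by rwa [List.drop_drop] at h3, by rwa [List.drop_drop] at h4,
    by rwa [List.drop_drop] at h5⟩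

-- join with the empty separator peels off the head
lemma pv_join_nil_cons (x : List Char) (xs : List (List Char)) :
    PySem.Chars.join [] (x :: xs) = x ++ PySem.Chars.join [] xs := by
  rw [pv_join_nil_eq_flatten, pv_join_nil_eq_flatten]
  simp

-- main induction: the single-pass scan equals the nested split/replace/join pipeline
lemma pv_scan_main (m : List (String × String)) (u b : List Char) (hu : u ≠ []) (hb : b ≠ []) :
    ∀ n s, s.length ≤ n → pvNoOv u b s →
    PySem.Chars.join [] (pvScan m u b (s.length + 1) [] s) =
      PySem.Chars.join u ((PySem.Chars.splitOn s u).map (fun p =>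
        PySem.Chars.join b ((PySem.Chars.splitOn p b).map (pvGetTok m)))) := by
  have hul : 1 ≤ u.length := by
    have h' : u.length ≠ 0 := by simpa using hu
    omega
  have hbl : 1 ≤ b.length := by
    have h' : b.length ≠ 0 := by simpa using hb
    omega
  intro n
  induction n with
  | zero =>
    intro s hs _
    have : s = [] := List.eq_nil_of_length_eq_zero (by omega)
    subst this
    rw [pv_splitOn_step [] u hu, pv_find_nil u hu, if_pos (by omega)]
    simp only [List.map_cons, List.map_nil]
    rw [pv_splitOn_step [] b hb, pv_find_nil b hb, if_pos (by omega)]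
    simp [pvScan, PySem.Chars.join_singleton]
  | succ n IH =>
    intro s hs hno
    by_cases hfu : PySem.Chars.find s u < 0
    · by_cases hfb : PySem.Chars.find s b < 0
      · -- no boundary at all: one token
        rw [pv_scan_none m u b hu hb s [] (s.length + 1) (by omega) hfu hfb]
        rw [pv_splitOn_step s u hu, if_pos hfu]
        simp only [List.map_cons, List.map_nil]
        rw [pv_splitOn_step s b hb, if_pos hfb]
        simp [PySem.Chars.join_singleton]
      · -- first boundary is b; no u anywhere
        have h0b : 0 ≤ PySem.Chars.find s b := by
          have := PySem.Chars.neg_one_le_find (s := s) (sub := b)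
          omega
        have hple : b.length ≤ (s.drop (PySem.Chars.find s b).toNat).length :=
          ((PySem.Chars.find_spec h0b).1).length_le
        simp only [List.length_drop] at hple
        rw [pv_scan_b m u b hu hb s [] (s.length + 1) (by omega) h0b (Or.inl hfu)]
        rw [pv_join_nil_cons, pv_join_nil_cons]
        rw [IH (s.drop ((PySem.Chars.find s b).toNat + b.length)) (by simp; omega)
          (pv_noov_drop u b s _ hno)]
        rw [pv_splitOn_step (s.drop ((PySem.Chars.find s b).toNat + b.length)) u hu,
          if_pos (by rw [pv_find_drop_neg s u _ hfu]; omega)]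
        simp only [List.map_cons, List.map_nil, PySem.Chars.join_singleton]
        rw [pv_splitOn_step s u hu, if_pos hfu]
        simp only [List.map_cons, List.map_nil, PySem.Chars.join_singleton]
        rw [pv_splitOn_step s b hb, if_neg (by omega)]
        simp only [List.map_cons]
        cases hx : (PySem.Chars.splitOn (s.drop ((PySem.Chars.find s b).toNat + b.length)) b).map
            (pvGetTok m) with
        | nil => exact absurd hx (by simpa using pv_splitOn_ne_nil _ _ hb)
        | cons y ys =>
          rw [pv_join_cons]
          simp
    · have h0u : 0 ≤ PySem.Chars.find s u := by
        have := PySem.Chars.neg_one_le_find (s := s) (sub := u)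
        omega
      have hpleu : u.length ≤ (s.drop (PySem.Chars.find s u).toNat).length :=
        ((PySem.Chars.find_spec h0u).1).length_le
      simp only [List.length_drop] at hpleu
      by_cases hord : PySem.Chars.find s b < 0 ∨ PySem.Chars.find s u ≤ PySem.Chars.find s b
      · -- first boundary is u
        rw [pv_scan_u m u b hu hb s [] (s.length + 1) (by omega) h0u hord]
        rw [pv_join_nil_cons, pv_join_nil_cons]
        rw [IH (s.drop ((PySem.Chars.find s u).toNat + u.length)) (by simp; omega)
          (pv_noov_drop u b s _ hno)]
        rw [pv_splitOn_step s u hu, if_neg (by omega)]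
        simp only [List.map_cons]
        -- the first unary piece contains no binary delimiter
        have hnb : PySem.Chars.find (s.take (PySem.Chars.find s u).toNat) b = -1 := by
          apply pv_find_take_neg s b _ hb
          rcases hord with h | h
          · left; exact h
          · right; exact ⟨by omega, by omega⟩
        rw [pv_splitOn_step (s.take (PySem.Chars.find s u).toNat) b hb,
          if_pos (by rw [hnb]; omega)]
        simp only [List.map_cons, List.map_nil, PySem.Chars.join_singleton]
        cases hx : (PySem.Chars.splitOn (s.drop ((PySem.Chars.find s u).toNat + u.length)) u).map
            (fun p => PySem.Chars.join b ((PySem.Chars.splitOn p b).map (pvGetTok m))) with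
        | nil => exact absurd hx (by simpa using pv_splitOn_ne_nil _ _ hu)
        | cons z zs =>
          rw [pv_join_cons]
          simp
      · -- first boundary is b, and a u occurrence exists further right
        push_neg at hord
        obtain ⟨hfbne, hlt⟩ := hord
        have h0b : 0 ≤ PySem.Chars.find s b := by
          have := PySem.Chars.neg_one_le_find (s := s) (sub := b)
          omega
        have hfblt : (PySem.Chars.find s b).toNat < (PySem.Chars.find s u).toNat := by omega
        have hpleb : b.length ≤ (s.drop (PySem.Chars.find s b).toNat).length :=
          ((PySem.Chars.find_spec h0b).1).length_le
        simp only [List.length_drop] at hpleb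
        -- the b occurrence must end before the u occurrence starts (no overlap)
        have hfit : (PySem.Chars.find s b).toNat + b.length ≤ (PySem.Chars.find s u).toNat := by
          by_contra hcon
          apply hno
          refine ⟨(PySem.Chars.find s b).toNat, (PySem.Chars.find s u).toNat, hfblt, by omega,
            (PySem.Chars.find_spec h0b).1, (PySem.Chars.find_spec h0u).1, ?_⟩
          intro hc
          exact absurd hc ((PySem.Chars.find_spec h0u).2 _ hfblt)
        rw [pv_scan_b m u b hu hb s [] (s.length + 1) (by omega) h0b (Or.inr (by omega))]
        rw [pv_join_nil_cons, pv_join_nil_cons]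
        rw [IH (s.drop ((PySem.Chars.find s b).toNat + b.length)) (by simp; omega)
          (pv_noov_drop u b s _ hno)]
        -- find u in the remainder after the b cut
        have hfu' : PySem.Chars.find (s.drop ((PySem.Chars.find s b).toNat + b.length)) u =
            PySem.Chars.find s u - ((PySem.Chars.find s b).toNat + b.length) :=
          pv_find_drop s u _ h0u (by omega)
        rw [pv_splitOn_step (s.drop ((PySem.Chars.find s b).toNat + b.length)) u hu,
          if_neg (by rw [hfu']; omega), hfu']
        have htn : (PySem.Chars.find s u - ((PySem.Chars.find s b).toNat + b.length)).toNat =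
            (PySem.Chars.find s u).toNat - ((PySem.Chars.find s b).toNat + b.length) := by omega
        rw [htn]
        -- identify the pieces on both sides
        have hpiece : (s.drop ((PySem.Chars.find s b).toNat + b.length)).take
              ((PySem.Chars.find s u).toNat - ((PySem.Chars.find s b).toNat + b.length)) =
            (s.take (PySem.Chars.find s u).toNat).drop ((PySem.Chars.find s b).toNat + b.length) := by
          rw [List.drop_take]
        have htail : (s.drop ((PySem.Chars.find s b).toNat + b.length)).drop
              ((PySem.Chars.find s u).toNat - ((PySem.Chars.find s b).toNat + b.length) + u.length) =
            s.drop ((PySem.Chars.find s u).toNat + u.length) := by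
          rw [List.drop_drop]
          congr 1
          omega
        -- A's side: unary split first
        rw [pv_splitOn_step s u hu, if_neg (by omega)]
        simp only [List.map_cons]
        have hfbp : PySem.Chars.find (s.take (PySem.Chars.find s u).toNat) b =
            PySem.Chars.find s b :=
          pv_find_take s b _ h0b (by omega)
        rw [pv_splitOn_step (s.take (PySem.Chars.find s u).toNat) b hb,
          if_neg (by rw [hfbp]; omega), hfbp]
        have hhead : (s.take (PySem.Chars.find s u).toNat).take (PySem.Chars.find s b).toNat =
            s.take (PySem.Chars.find s b).toNat := by
          rw [List.take_take]
          congr 1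
          omega
        rw [hhead, hpiece, htail]
        simp only [List.map_cons]
        cases hx1 : (PySem.Chars.splitOn
            ((s.take (PySem.Chars.find s u).toNat).drop ((PySem.Chars.find s b).toNat + b.length)) b).map
            (pvGetTok m) with
        | nil => exact absurd hx1 (by simpa using pv_splitOn_ne_nil _ _ hb)
        | cons y ys =>
          cases hx2 : (PySem.Chars.splitOn (s.drop ((PySem.Chars.find s u).toNat + u.length)) u).map
              (fun p => PySem.Chars.join b ((PySem.Chars.splitOn p b).map (pvGetTok m))) with
          | nil => exact absurd hx2 (by simpa using pv_splitOn_ne_nil _ _ hu)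
          | cons z zs =>
            rw [pv_join_cons, pv_join_cons, pv_join_cons]
            simp

-- one-step unfolding of the two scanners
lemma pv_scanIdx_succ (m : List (String × String)) (u b t : List Char) (f i ts : Nat) :
    pvScanIdx m u b t (f + 1) i ts =
      if i < t.length then
        if PySem.Chars.startswith (t.drop i) u then
          pvGetTok m ((t.drop ts).take (i - ts)) :: u ::
            pvScanIdx m u b t f (i + u.length) (i + u.length)
        else if PySem.Chars.startswith (t.drop i) b then
          pvGetTok m ((t.drop ts).take (i - ts)) :: b ::
            pvScanIdx m u b t f (i + b.length) (i + b.length)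
        else
          pvScanIdx m u b t f (i + 1) ts
      else [pvGetTok m (t.drop ts)] := rfl

lemma pv_scan_succ_cons (m : List (String × String)) (u b : List Char) (f : Nat)
    (tok : List Char) (c : Char) (rs : List Char) :
    pvScan m u b (f + 1) tok (c :: rs) =
      if PySem.Chars.startswith (c :: rs) u then
        pvGetTok m tok :: u :: pvScan m u b f [] ((c :: rs).drop u.length)
      else if PySem.Chars.startswith (c :: rs) b then
        pvGetTok m tok :: b :: pvScan m u b f [] ((c :: rs).drop b.length)
      else
        pvScan m u b f (tok ++ [c]) rs := rfl

-- the index-based port computes the (token, suffix) scanner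
lemma pv_scanIdx_eq (m : List (String × String)) (u b t : List Char) :
    ∀ fuel i ts, ts ≤ i →
    pvScanIdx m u b t fuel i ts = pvScan m u b fuel ((t.drop ts).take (i - ts)) (t.drop i) := by
  intro fuel
  induction fuel with
  | zero => intro i ts _; rfl
  | succ f IH =>
    intro i ts hts
    by_cases hi : i < t.length
    · cases h : t.drop i with
      | nil =>
        exfalso
        have := congrArg List.length h
        simp at this
        omega
      | cons c rs =>
        rw [pv_scanIdx_succ, if_pos hi, h, pv_scan_succ_cons]
        by_cases h1 : PySem.Chars.startswith (c :: rs) u = true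
        · rw [if_pos h1, if_pos h1, IH (i + u.length) (i + u.length) le_rfl]
          have hdrop : (c :: rs).drop u.length = t.drop (i + u.length) := by
            rw [← h, List.drop_drop]
          rw [hdrop, Nat.sub_self]
          simp
        · rw [if_neg h1, if_neg h1]
          by_cases h2 : PySem.Chars.startswith (c :: rs) b = true
          · rw [if_pos h2, if_pos h2, IH (i + b.length) (i + b.length) le_rfl]
            have hdrop : (c :: rs).drop b.length = t.drop (i + b.length) := by
              rw [← h, List.drop_drop]
            rw [hdrop, Nat.sub_self]
            simp
          · rw [if_neg h2, if_neg h2, IH (i + 1) ts (by omega)]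
            have hrs : t.drop (i + 1) = rs := by
              have h' := congrArg (List.drop 1) h
              simpa [List.drop_drop] using h'
            have hgec : t[i]? = some c := by
              have h0 := congrArg (fun l : List Char => l[0]?) h
              simp only [List.getElem?_drop] at h0
              simpa using h0
            have htok : (t.drop ts).take (i - ts) ++ [c] = (t.drop ts).take (i + 1 - ts) := by
              have hsucc : i + 1 - ts = (i - ts) + 1 := by omega
              rw [hsucc, List.take_add_one, List.getElem?_drop]
              have harg : ts + (i - ts) = i := by omega
              rw [harg, hgec]
              rfl
            rw [← htok, hrs]
    · rw [pv_scanIdx_succ, if_neg hi]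
      have hnil : t.drop i = [] := List.drop_eq_nil_of_le (by omega)
      have htok : (t.drop ts).take (i - ts) = t.drop ts := by
        apply List.take_of_length_le
        simp
        omega
      rw [hnil, htok]
      rfl

-- the two ports agree under Pre_
lemma pv_main (text : String) (fine_to_coarse : List (String × String))
    (unary_symbol binary_symbol : String)
    (hu : unary_symbol ≠ "") (hb : binary_symbol ≠ "")
    (hno : pvNoOv unary_symbol.toList binary_symbol.toList text.toList) :
    replace_symbols text fine_to_coarse unary_symbol binary_symbol =
      replace_symbols_alt text fine_to_coarse unary_symbol binary_symbol := by
  have hul := pv_toList_ne_nil _ hu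
  have hbl := pv_toList_ne_nil _ hb
  unfold replace_symbols replace_symbols_alt
  rw [pv_scanIdx_eq fine_to_coarse unary_symbol.toList binary_symbol.toList text.toList
    (text.toList.length + 1) 0 0 le_rfl]
  simp only [Nat.sub_self, List.take_zero, List.drop_zero]
  rw [pv_scan_main fine_to_coarse _ _ hul hbl text.toList.length text.toList le_rfl hno]
  simp only [PySem.Chars.split?, List.isEmpty_iff, hul, hbl, if_false]
  congr 1
  rw [PySem.List.foldl_append_singleton_eq_map]
  simp only [List.nil_append]
  congr 1
  apply List.map_congr_left
  intro unary _
  rw [PySem.List.foldl_append_singleton_eq_map]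
  simp

-- Pre_'s bounded no-overlap clause gives the unbounded proof-side property
lemma pv_pre_noov (text unary_symbol binary_symbol : String)
    (hu : unary_symbol ≠ "")
    (h : ¬ ∃ p < text.toList.length, ∃ q < text.toList.length,
      p < q ∧ q < p + binary_symbol.toList.length ∧
      binary_symbol.toList <+: text.toList.drop p ∧
      unary_symbol.toList <+: text.toList.drop q ∧
      ¬ unary_symbol.toList <+: text.toList.drop p) :
    pvNoOv unary_symbol.toList binary_symbol.toList text.toList := by
  rintro ⟨p, q, h1, h2, h3, h4, h5⟩
  have hul := pv_toList_ne_nil _ hu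
  have hq : q < text.toList.length := by
    by_contra hc
    rw [List.drop_eq_nil_of_le (by omega)] at h4
    exact hul (List.prefix_nil.mp h4)
  exact h ⟨p, by omega, q, hq, h1, h2, h3, h4, h5⟩

-- ===== VERDICT (by name: the statement is the Claim_ definition above) =====
theorem replace_symbols_spec : Claim_equal_replace_symbols := by
  intro text fine_to_coarse unary_symbol binary_symbol _ hpre
  unfold Spec_replace_symbols
  exact pv_main text fine_to_coarse unary_symbol binary_symbol hpre.1 hpre.2.1
    (pv_pre_noov text unary_symbol binary_symbol hpre.1 hpre.2.2)
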